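-- pv_equiv track=rewrite | github.com/Hurkify-Team/OpenField | Openfield/app.py | _find_next_unanswered_index
-- ===== SOURCE A (Python) =====
-- from typing import List, Dict, Optional
--
-- def _find_next_unanswered_index(template_questions, answered_map: Dict[int, Dict]) -> int:
--     # first: required unanswered
--     for i, (qid, qtext, qtype, order_no, is_req) in enumerate(template_questions):
--         if int(is_req) == 1 and int(qid) not in answered_map:
--             return i
--     # second: any unanswered
--     for i, (qid, qtext, qtype, order_no, is_req) in enumerate(template_questions):
--         if int(qid) not in answered_map:
--             return i
--     return 0
-- ===== SOURCE B (Python) =====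
-- def _find_next_unanswered_index(template_questions, answered_map):
--     first_any = None
--     for i, (qid, qtext, qtype, order_no, is_req) in enumerate(template_questions):
--         if int(qid) not in answered_map:
--             if int(is_req) == 1:
--                 return i
--             if first_any is None:
--                 first_any = i
--     return first_any if first_any is not None else 0
-- ===== Notes on version B (the rewrite author's own statement) =====
-- stated objective: simpler
-- what changed: Replaces A's two full enumeration passes with one pass that returns immediately on a required unanswered question and remembers the first unanswered question of any kind as a fallback.
import Mathlib
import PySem

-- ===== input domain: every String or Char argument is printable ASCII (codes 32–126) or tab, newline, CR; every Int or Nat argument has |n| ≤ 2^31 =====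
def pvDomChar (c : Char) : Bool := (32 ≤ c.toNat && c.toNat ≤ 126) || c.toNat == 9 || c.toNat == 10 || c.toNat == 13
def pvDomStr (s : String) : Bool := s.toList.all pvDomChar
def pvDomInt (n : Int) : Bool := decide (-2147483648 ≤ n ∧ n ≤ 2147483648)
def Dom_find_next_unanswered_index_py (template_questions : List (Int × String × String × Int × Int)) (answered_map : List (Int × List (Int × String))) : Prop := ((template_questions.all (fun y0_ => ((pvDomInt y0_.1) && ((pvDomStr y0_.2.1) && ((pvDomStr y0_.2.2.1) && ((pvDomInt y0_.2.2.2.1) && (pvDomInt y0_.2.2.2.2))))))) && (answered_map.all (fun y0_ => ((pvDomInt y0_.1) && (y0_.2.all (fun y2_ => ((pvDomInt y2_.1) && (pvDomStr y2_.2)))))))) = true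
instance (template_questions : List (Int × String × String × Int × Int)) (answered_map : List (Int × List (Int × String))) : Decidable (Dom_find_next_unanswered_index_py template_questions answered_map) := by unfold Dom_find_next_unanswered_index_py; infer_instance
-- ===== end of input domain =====

-- B: one pass remembering the first unanswered question, instead of A's two full passes; objective: simpler.
-- ===== PORT A =====
-- 'int(qid) not in answered_map': dict-key membership test
def pvAnswered (answered_map : List (Int × List (Int × String))) (qid : Int) : Bool :=
  answered_map.any (fun p => p.1 == qid)

-- first loop of A: required unanswered
def pvScanReq (answered_map : List (Int × List (Int × String))) :
    List (Int × String × String × Int × Int) → Int → Option Int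
  | [], _ => none
  | (qid, _, _, _, is_req) :: rest, i =>
    if is_req == 1 && !(pvAnswered answered_map qid) then some i
    else pvScanReq answered_map rest (i + 1)

-- second loop of A: any unanswered
def pvScanAny (answered_map : List (Int × List (Int × String))) :
    List (Int × String × String × Int × Int) → Int → Option Int
  | [], _ => none
  | (qid, _, _, _, _) :: rest, i =>
    if !(pvAnswered answered_map qid) then some i
    else pvScanAny answered_map rest (i + 1)

def find_next_unanswered_index_py (template_questions : List (Int × String × String × Int × Int)) (answered_map : List (Int × List (Int × String))) : Int :=
  match pvScanReq answered_map template_questions 0 with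
  | some i => i
  | none =>
    match pvScanAny answered_map template_questions 0 with
    | some i => i
    | none => 0

-- ===== PORT B =====
-- single pass with the remembered first unanswered index ('first_any')
def pvScanB (answered_map : List (Int × List (Int × String))) :
    List (Int × String × String × Int × Int) → Int → Option Int → Int
  | [], _, first_any => first_any.getD 0
  | (qid, _, _, _, is_req) :: rest, i, first_any =>
    if !(pvAnswered answered_map qid) then
      if is_req == 1 then i
      else pvScanB answered_map rest (i + 1) (if first_any.isNone then some i else first_any)
    else pvScanB answered_map rest (i + 1) first_any

def find_next_unanswered_index_py_alt (template_questions : List (Int × String × String × Int × Int)) (answered_map : List (Int × List (Int × String))) : Int :=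
  pvScanB answered_map template_questions 0 none

-- ===== PRECONDITION & SPEC =====
def Spec_find_next_unanswered_index_py (template_questions : List (Int × String × String × Int × Int)) (answered_map : List (Int × List (Int × String))) (out : Int) : Prop := out = find_next_unanswered_index_py_alt template_questions answered_map
instance (template_questions : List (Int × String × String × Int × Int)) (answered_map : List (Int × List (Int × String))) (out : Int) : Decidable (Spec_find_next_unanswered_index_py template_questions answered_map out) := by unfold Spec_find_next_unanswered_index_py; infer_instance

-- ===== CLAIM (what is proved, stated in full; the proofs are below) =====
def Claim_equal_find_next_unanswered_index_py : Prop := ∀ (template_questions : List (Int × String × String × Int × Int)) (answered_map : List (Int × List (Int × String))), Dom_find_next_unanswered_index_py template_questions answered_map → Spec_find_next_unanswered_index_py template_questions answered_map (find_next_unanswered_index_py template_questions answered_map)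

-- ===== LEMMAS AND PROOFS =====
-- invariant relating B's single pass to A's two scans
theorem pvScanB_eq (answered_map : List (Int × List (Int × String)))
    (qs : List (Int × String × String × Int × Int)) :
    ∀ (i : Int) (fa : Option Int),
      pvScanB answered_map qs i fa =
        match pvScanReq answered_map qs i with
        | some j => j
        | none =>
          match fa with
          | some f => f
          | none => (pvScanAny answered_map qs i).getD 0 := by
  induction qs with
  | nil =>
    intro i fa
    cases fa <;> simp [pvScanB, pvScanReq, pvScanAny]
  | cons q rest ih =>
    intro i fa
    obtain ⟨qid, qt, qy, on_, req⟩ := q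
    by_cases hmem : pvAnswered answered_map qid = true
    · -- answered: all scans skip
      simp [pvScanB, pvScanReq, pvScanAny, hmem, ih]
    · simp only [Bool.not_eq_true] at hmem
      by_cases hreq : (req == 1) = true
      · simp [pvScanB, pvScanReq, hmem, hreq]
      · -- unanswered, not required
        simp only [pvScanB, pvScanReq, pvScanAny, hmem, hreq, Bool.not_false, if_true, Bool.and_true]
        cases fa with
        | none => simp [ih]
        | some f => simp [ih]

-- ===== VERDICT (by name) =====
theorem find_next_unanswered_index_py_spec : Claim_equal_find_next_unanswered_index_py := by
  intro qs am _
  unfold Spec_find_next_unanswered_index_py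
  unfold find_next_unanswered_index_py find_next_unanswered_index_py_alt
  rw [pvScanB_eq]
  rcases h : pvScanReq am qs 0 with _ | j
  · rcases pvScanAny am qs 0 <;> simp
  · simp
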